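-- pv_equiv track=rewrite | github.com/mmshihov/discrete-math | code/python/kvain-petrick.py | getSdnf
-- ===== SOURCE A (Python) =====
-- def getSdnf(vector, n):
--     sdnf = []
--     argCount = 1 << n
--     arg = 0
--     while (arg < argCount):
--         if ((vector >> arg) & 1):
--             sdnf.append(getConstituent(arg, n))
--         arg = arg + 1
--     return sdnf
--
-- def getConstituent(arg, n):
--     i = 0
--     constituent = ""
--     while (i < n):
--         constituent = "{0}".format((arg >> i) & 1) + constituent
--         i = i + 1
--     return "#" + constituent
-- ===== SOURCE B (Python) =====
-- def getSdnf(vector, n):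
--     return ["#" + s for s in _suffixes(vector, n)]
--
-- def _suffixes(vector, n):
--     # list of n-bit constituent bodies (MSB first) for the set positions of
--     # vector below 2**n, built by splitting the truth vector in halves
--     if n == 0:
--         return [""] if vector & 1 else []
--     half = 1 << (n - 1)
--     low = _suffixes(vector, n - 1)
--     high = _suffixes(vector >> half, n - 1)
--     return ["0" + s for s in low] + ["1" + s for s in high]
-- ===== Notes on version B (the rewrite author's own statement) =====
-- stated objective: alternative
-- what changed: Replaces A's linear scan of all 2^n argument indices (rebuilding each constituent bit by bit in an inner loop) with a divide-and-conquer recursion that splits the truth vector into low/high halves and prefixes '0'/'1' to the recursively built suffix strings.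
import Mathlib
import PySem

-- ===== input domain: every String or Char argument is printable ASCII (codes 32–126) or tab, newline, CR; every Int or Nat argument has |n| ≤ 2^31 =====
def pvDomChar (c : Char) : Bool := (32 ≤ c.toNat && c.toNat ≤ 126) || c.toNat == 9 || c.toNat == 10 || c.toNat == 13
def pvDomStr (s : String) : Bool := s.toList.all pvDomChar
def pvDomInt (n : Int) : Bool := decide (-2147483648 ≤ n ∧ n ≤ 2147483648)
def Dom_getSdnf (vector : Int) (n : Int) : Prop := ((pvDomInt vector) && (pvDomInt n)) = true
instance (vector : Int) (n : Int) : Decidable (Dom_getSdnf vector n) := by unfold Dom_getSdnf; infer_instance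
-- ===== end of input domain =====

-- B replaces A's scan of all 2^n argument indices by a divide-and-conquer recursion that
-- splits the truth vector in halves and prefixes '0'/'1' (objective: alternative algorithm).


-- ===== PORT A =====
-- i = 0; while (i < n): constituent = "{0}".format((arg >> i) & 1) + constituent; i += 1
-- The 1-step count-up loop is a fold over range(0, n); the Int shifts `arg >> i`, `1 << n`,
-- `vector >> arg` are Python-exact for nonnegative shift counts, which Pre_ (0 ≤ n) guarantees.
def getConstituent (arg : Int) (n : Int) : String :=
  "#" ++ (PySem.List.pyRange 0 n).foldl
    (fun constituent i => PySem.Int.toStr (PySem.Int.band (arg >>> i) 1) ++ constituent) ""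

-- arg = 0; while (arg < argCount): if ((vector >> arg) & 1): sdnf.append(...); arg += 1
-- argCount = 1 << n; Python raises ValueError for n < 0 (excluded by Pre_).
def getSdnf (vector : Int) (n : Int) : List String :=
  (PySem.List.pyRange 0 ((1 : Int) <<< n)).foldl
    (fun sdnf arg =>
      if PySem.Int.band (vector >>> arg) 1 ≠ 0 then sdnf ++ [getConstituent arg n]
      else sdnf) []

-- ===== PORT B =====
-- _suffixes of Source B, recursing on the width n (a nonnegative int under Pre_, hence a Nat here).
def pySuffixes (vector : Int) : Nat → List String
  | 0 => if PySem.Int.band vector 1 ≠ 0 then [""] else []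
  | m + 1 =>
      let half : Int := (1 : Int) <<< (m : Int)
      (pySuffixes vector m).map (fun s => "0" ++ s)
        ++ (pySuffixes (vector >>> half) m).map (fun s => "1" ++ s)

-- n.toNat is exact for 0 ≤ n (Pre_); Python B raises ValueError for n < 0 just like A.
def getSdnf_alt (vector : Int) (n : Int) : List String :=
  (pySuffixes vector n.toNat).map (fun s => "#" ++ s)

-- ===== PRECONDITION & SPEC =====
-- Python A raises ValueError ("negative shift count") for n < 0; that is all Pre_ excludes.
def Pre_getSdnf (vector : Int) (n : Int) : Prop := 0 ≤ n
instance (vector : Int) (n : Int) : Decidable (Pre_getSdnf vector n) := by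
  unfold Pre_getSdnf; infer_instance

def pvWitness_getSdnf : Int × Int := (5, 2)

def Spec_getSdnf (vector : Int) (n : Int) (out : List String) : Prop := out = getSdnf_alt vector n
instance (vector : Int) (n : Int) (out : List String) : Decidable (Spec_getSdnf vector n out) := by
  unfold Spec_getSdnf; infer_instance

-- ===== CLAIM (what is proved, stated in full; the proofs are below) =====
def Claim_equal_getSdnf : Prop := ∀ (vector : Int) (n : Int), Dom_getSdnf vector n → Pre_getSdnf vector n → Spec_getSdnf vector n (getSdnf vector n)

-- ===== LEMMAS AND PROOFS =====

-- the bit test both programs perform, at a nonnegative position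
def bitB (v : Int) (a : Nat) : Bool := PySem.Int.band (v >>> a) 1 != 0

-- the constituent body (bits of a, most significant of the low m bits first)
def bitsN (a : Nat) (m : Nat) : String :=
  match m with
  | 0 => ""
  | m + 1 => PySem.Int.toStr (PySem.Int.band ((a : Int) >>> m) 1) ++ bitsN a m

lemma pyRange_zero_zero : PySem.List.pyRange 0 0 = [] :=
  List.eq_nil_iff_forall_not_mem.mpr fun x hx => by
    have := PySem.List.mem_pyRange_one.mp hx; omega

lemma pyRange_succ_right (m : Nat) :
    PySem.List.pyRange 0 ((m + 1 : Nat) : Int)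
      = PySem.List.pyRange 0 (m : Int) ++ [(m : Int)] := by
  have h1 : PySem.List.pyRange 0 ((m + 1 : Nat) : Int)
      = PySem.List.pyRange 0 (m : Int) ++ PySem.List.pyRange (m : Int) ((m + 1 : Nat) : Int) :=
    PySem.List.pyRange_one_append 0 (m : Int) ((m + 1 : Nat) : Int) (by push_cast; omega)
      (by push_cast; omega)
  have h2 : PySem.List.pyRange ((m : Int) + 1) ((m + 1 : Nat) : Int) = [] :=
    List.eq_nil_iff_forall_not_mem.mpr fun x hx => by
      have := PySem.List.mem_pyRange_one.mp hx; push_cast at this; omega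
  have h3 : PySem.List.pyRange (m : Int) ((m + 1 : Nat) : Int) = [(m : Int)] := by
    rw [PySem.List.pyRange_one_cons (by push_cast; omega), h2]
  rw [h1, h3]

lemma pyRange_natCast (N : Nat) :
    PySem.List.pyRange 0 (N : Int) = (List.range N).map (fun a : Nat => (a : Int)) := by
  induction N with
  | zero => simpa using pyRange_zero_zero
  | succ N ih => rw [pyRange_succ_right, List.range_succ, List.map_append, ih]; rfl

lemma constFold (a : Nat) : ∀ m : Nat,
    (PySem.List.pyRange 0 (m : Int)).foldl
      (fun constituent i => PySem.Int.toStr (PySem.Int.band ((a : Int) >>> i) 1) ++ constituent) ""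
      = bitsN a m := by
  intro m
  induction m with
  | zero => simpa [bitsN] using congrArg _ pyRange_zero_zero
  | succ m ih =>
      rw [pyRange_succ_right, List.foldl_append, ih, bitsN]
      simp only [List.foldl_cons, List.foldl_nil, Int.shiftRight_natCast_right]

lemma getConstituent_eq (a m : Nat) :
    getConstituent (a : Int) (m : Int) = "#" ++ bitsN a m := by
  rw [getConstituent, constFold]

lemma shiftRight_natCast (a b : Nat) : ((a : Int) >>> b) = ((a >>> b : Nat) : Int) := rfl

lemma shiftRight_lt (a m : Nat) (h : a < 2 ^ m) : a >>> m = 0 := by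
  simp [Nat.shiftRight_eq_div_pow]; omega

lemma shiftRight_add_pow (a m : Nat) (h : a < 2 ^ m) : (2 ^ m + a) >>> m = 1 := by
  rw [Nat.shiftRight_eq_div_pow, Nat.add_comm, Nat.add_div_right _ (Nat.two_pow_pos m),
    Nat.div_eq_of_lt h]

lemma low_bits_add_pow (a m i : Nat) (h : i < m) :
    ((2 ^ m + a) >>> i) &&& 1 = (a >>> i) &&& 1 := by
  have e : 2 ^ m = 2 ^ i * 2 ^ (m - i) := by rw [← pow_add]; congr 1; omega
  have h1 : (2 ^ m + a) / 2 ^ i = 2 ^ (m - i) + a / 2 ^ i := by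
    rw [e, Nat.mul_add_div (Nat.two_pow_pos i)]
  have h2 : 2 ^ (m - i) % 2 = 0 := by
    have : (2 : Nat) ∣ 2 ^ (m - i) := dvd_pow_self 2 (by omega)
    omega
  simp [Nat.shiftRight_eq_div_pow, Nat.and_one_is_mod, h1]
  omega

lemma band_one_natCast (x : Nat) : PySem.Int.band (x : Int) 1 = ((x &&& 1 : Nat) : Int) := by
  have := PySem.Int.band_natCast x 1
  simpa using this

lemma bitsN_low (a m : Nat) (h : a < 2 ^ m) : bitsN a (m + 1) = "0" ++ bitsN a m := by
  rw [bitsN, shiftRight_natCast, shiftRight_lt a m h]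
  rfl

lemma bitsN_add_pow (a m : Nat) (h : a < 2 ^ m) : ∀ (k : Nat), k ≤ m →
    bitsN (2 ^ m + a) k = bitsN a k := by
  intro k
  induction k with
  | zero => intro _; rfl
  | succ k ih =>
      intro hk
      rw [bitsN, bitsN, ih (by omega), shiftRight_natCast, shiftRight_natCast,
        band_one_natCast, band_one_natCast, low_bits_add_pow a m k (by omega)]

lemma bitsN_high (a m : Nat) (h : a < 2 ^ m) : bitsN (2 ^ m + a) (m + 1) = "1" ++ bitsN a m := by
  rw [bitsN, shiftRight_natCast, shiftRight_add_pow a m h, bitsN_add_pow a m h m le_rfl]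
  rfl

lemma bitB_add (v : Int) (a b : Nat) : bitB v (a + b) = bitB (v >>> a) b := by
  rw [bitB, bitB, Int.shiftRight_add]

-- A's outer fold, as a filter-and-map over the index range
lemma getSdnf_eq_range (v : Int) (m : Nat) :
    getSdnf v (m : Int) = ((List.range (2 ^ m)).filter (bitB v)).map
      (fun x : Nat => getConstituent (x : Int) (m : Int)) := by
  have h1 : ((1 : Int) <<< ((m : Nat) : Int)) = ((2 ^ m : Nat) : Int) := Int.one_shiftLeft m
  have hfun : (fun (sdnf : List String) (arg : Int) =>
        if PySem.Int.band (v >>> arg) 1 ≠ 0 then sdnf ++ [getConstituent arg (m : Int)]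
        else sdnf)
      = (fun (sdnf : List String) (arg : Int) =>
        if (PySem.Int.band (v >>> arg) 1 != 0) = true
        then sdnf ++ [getConstituent arg (m : Int)] else sdnf) := by
    funext sdnf arg
    by_cases h : PySem.Int.band (v >>> arg) 1 = 0 <;> simp [h]
  rw [getSdnf, h1, hfun, PySem.List.foldl_append_if, pyRange_natCast, List.filter_map,
    List.map_map, List.nil_append]
  congr 1
  exact List.filter_congr fun a _ => by
    show (PySem.Int.band (v >>> ((a : Nat) : Int)) 1 != 0) = bitB v a
    rw [Int.shiftRight_natCast_right, bitB]

-- both programs build the same constituent list, by induction on the width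
lemma suffixes_main (m : Nat) : ∀ (v : Int),
    ((List.range (2 ^ m)).filter (bitB v)).map (fun a => bitsN a m) = pySuffixes v m := by
  induction m with
  | zero =>
      intro v
      rw [pow_zero, List.range_one, pySuffixes]
      by_cases h : PySem.Int.band v 1 ≠ 0
      · have hb : bitB v 0 = true := by simp [bitB, Int.shiftRight_zero, h]
        rw [if_pos h]
        simp [hb, bitsN]
      · have h0 : PySem.Int.band v 1 = 0 := of_not_not h
        have hb : bitB v 0 = false := by simp [bitB, Int.shiftRight_zero, h0]
        rw [if_neg h]
        simp [hb]
  | succ m ih =>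
      intro v
      have hsplit : (2 : Nat) ^ (m + 1) = 2 ^ m + 2 ^ m := by ring
      rw [hsplit, List.range_add, List.filter_append, List.map_append]
      have hlow : ((List.range (2 ^ m)).filter (bitB v)).map (fun a => bitsN a (m + 1))
          = (pySuffixes v m).map (fun s => "0" ++ s) := by
        rw [List.map_congr_left (g := fun a => "0" ++ bitsN a m)
          (fun a ha => bitsN_low a m (List.mem_range.mp (List.mem_of_mem_filter ha)))]
        rw [← ih v, List.map_map]
        rfl
      have hfil : ((List.range (2 ^ m)).map (2 ^ m + ·)).filter (bitB v)
          = ((List.range (2 ^ m)).filter (bitB (v >>> (2 ^ m : Nat)))).map (2 ^ m + ·) := by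
        rw [List.filter_map]
        exact congrArg (List.map (2 ^ m + ·))
          (List.filter_congr fun a _ => bitB_add v (2 ^ m) a)
      have hhigh : (((List.range (2 ^ m)).map (2 ^ m + ·)).filter (bitB v)).map
            (fun a => bitsN a (m + 1))
          = (pySuffixes (v >>> (2 ^ m : Nat)) m).map (fun s => "1" ++ s) := by
        have hcg := List.map_congr_left
          (l := (List.range (2 ^ m)).filter (bitB (v >>> (2 ^ m : Nat))))
          (f := (fun a => bitsN a (m + 1)) ∘ (fun x => 2 ^ m + x))
          (g := fun a => "1" ++ bitsN a m)
          (fun a ha => bitsN_high a m (List.mem_range.mp (List.mem_of_mem_filter ha)))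
        rw [hfil, List.map_map, hcg, ← ih (v >>> (2 ^ m : Nat)), List.map_map]
        rfl
      rw [hlow, hhigh]
      simp only [pySuffixes, Int.one_shiftLeft, Int.shiftRight_natCast_right]

-- ===== VERDICT (by name: the statement is the Claim_ definition above) =====
theorem getSdnf_spec : Claim_equal_getSdnf := by
  intro v n _ hpre
  unfold Spec_getSdnf
  obtain ⟨m, rfl⟩ : ∃ m : Nat, n = (m : Int) := ⟨n.toNat, (Int.toNat_of_nonneg hpre).symm⟩
  rw [getSdnf_eq_range, getSdnf_alt, Int.toNat_natCast, ← suffixes_main m v, List.map_map]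
  exact List.map_congr_left fun a _ => getConstituent_eq a m
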